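-- pv_equiv track=rewrite | github.com/HmmOrange/page_replacement_algo | algo.py | mru
-- ===== SOURCE A (Python) =====
-- from collections import defaultdict, deque
--
-- def mru(pages, frame_size):
--     page_frame = [None] * frame_size
--     page_faults = 0
--     history = []
--
--     recently_used_queue = deque([])
--
--     for page in pages:
--         if page in page_frame:
--             recently_used_queue.remove(page)
--             recently_used_queue.append(page)
--         else:
--             in_queue = False
--             for i in range(len(page_frame)):
--                 if page_frame[i] == None:
--                     page_frame[i] = page
--                     recently_used_queue.append(page)
--                     in_queue = True
--                     break
--
--             if not in_queue:
--                 mru_page = recently_used_queue.pop()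
--                 page_frame[page_frame.index(mru_page)] = page
--
--                 recently_used_queue.append(page)
--
--             page_faults += 1
--
--         history.append(page_frame.copy())
--     return page_faults, history
-- ===== SOURCE B (Python) =====
-- def mru(pages, frame_size):
--     # Different data structure: no fixed-size frame with None holes and no
--     # recency deque.  Slots fill left to right, so the occupied slots are a
--     # growing prefix: keep only that prefix as a plain list `filled`, plus the
--     # slot index `last` of the most recently accessed page (under MRU the
--     # eviction victim is always that slot).  Each snapshot is rebuilt on the
--     # fly by padding `filled` with None.
--     filled = []
--     last = -1
--     faults = 0
--     history = []
--     for page in pages: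
--         if page in filled:
--             last = filled.index(page)
--         elif len(filled) < frame_size:
--             filled.append(page)
--             last = len(filled) - 1
--             faults += 1
--         else:
--             filled[last] = page
--             faults += 1
--         history.append([*filled] + [None] * (frame_size - len(filled)))
--     return faults, history
-- ===== Notes on version B (the rewrite author's own statement) =====
-- stated objective: simpler
-- what changed: A's fixed-size None-holed frame plus a recency deque (remove/append/pop surgery) are replaced by a single growing prefix list of resident pages and one integer slot index of the most recently used page (under MRU the eviction victim is always that slot); snapshots are rebuilt by padding the prefix with None.
import Mathlib
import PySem

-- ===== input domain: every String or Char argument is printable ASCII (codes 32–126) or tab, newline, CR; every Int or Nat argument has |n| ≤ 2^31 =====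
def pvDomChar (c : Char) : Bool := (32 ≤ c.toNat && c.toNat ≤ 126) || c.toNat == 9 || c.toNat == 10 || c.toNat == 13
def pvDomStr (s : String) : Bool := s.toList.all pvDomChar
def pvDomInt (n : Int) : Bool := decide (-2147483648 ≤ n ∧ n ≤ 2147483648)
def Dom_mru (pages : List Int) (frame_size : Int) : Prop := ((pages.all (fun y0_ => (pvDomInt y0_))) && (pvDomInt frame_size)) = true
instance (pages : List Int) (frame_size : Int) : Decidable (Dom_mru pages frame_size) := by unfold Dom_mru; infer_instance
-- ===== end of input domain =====

-- B drops A's None-holed frame and recency deque: it keeps only the growing prefix of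
-- resident pages plus the slot index of the most recently used page; objective: simpler.

-- ===== PORT A =====
-- state: (page_frame, recently_used_queue, page_faults, history)
-- the inner 'for i in range(len(page_frame)) … break' is the first-None search: PySem.List.index? f none (exact);
-- page_frame.index(mru_page) is PySem.List.index? (always succeeds in Python here, getD 0 is never taken under Pre_).
def mruStep (st : List (Option Int) × List Int × Int × List (List (Option Int))) (page : Int) :
    List (Option Int) × List Int × Int × List (List (Option Int)) :=
  let (f, q, faults, hist) := st
  if (some page) ∈ f then
    let q' := ((PySem.List.remove? q page).getD q) ++ [page]
    (f, q', faults, hist ++ [f])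
  else
    match PySem.List.index? f none with
    | some i =>
      let f' := f.set i (some page)
      (f', q ++ [page], faults + 1, hist ++ [f'])
    | none =>
      match q.getLast? with
      | some m =>
        let f' := f.set ((PySem.List.index? f (some m)).getD 0) (some page)
        (f', q.dropLast ++ [page], faults + 1, hist ++ [f'])
      | none => (f, q, faults, hist ++ [f])  -- Python raises IndexError here (pop from empty deque); excluded by Pre_

def mru (pages : List Int) (frame_size : Int) : Int × List (List (Option Int)) :=
  let st := pages.foldl mruStep (List.replicate frame_size.toNat none, [], 0, [])
  (st.2.2.1, st.2.2.2)

-- ===== PORT B =====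
-- '[*filled] + [None] * (frame_size - len(filled))': the snapshot rebuilt from the prefix
def snapB (fs : Int) (filled : List Int) : List (Option Int) :=
  filled.map some ++ List.replicate (fs - (filled.length : Int)).toNat none

-- the for loop as structural recursion on the page list; faults are summed and the
-- history consed on the way back out (same values as Source B's forward accumulators)
def mruAltGo (fs : Int) (filled : List Int) (last : Int) : List Int → Int × List (List (Option Int))
  | [] => (0, [])
  | page :: rest =>
    if page ∈ filled then
      let r := mruAltGo fs filled (((PySem.List.index? filled page).getD 0 : Nat) : Int) rest
      (r.1, snapB fs filled :: r.2)
    else if (filled.length : Int) < fs then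
      let filled' := filled ++ [page]
      let r := mruAltGo fs filled' ((filled'.length : Int) - 1) rest
      (r.1 + 1, snapB fs filled' :: r.2)
    else
      let filled' := PySem.List.pySetD filled last page  -- filled[last] = page ; last = -1 on [] raises in Python, excluded by Pre_
      let r := mruAltGo fs filled' last rest
      (r.1 + 1, snapB fs filled' :: r.2)

def mru_alt (pages : List Int) (frame_size : Int) : Int × List (List (Option Int)) :=
  mruAltGo frame_size [] (-1) pages

-- ===== PRECONDITION & SPEC =====
-- Pre_ excludes frame_size ≤ 0 with a nonempty page list: there both A and B raise IndexError
-- (A pops from an empty deque, B indexes the empty prefix list).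
def Pre_mru (pages : List Int) (frame_size : Int) : Prop := pages = [] ∨ 1 ≤ frame_size
instance (pages : List Int) (frame_size : Int) : Decidable (Pre_mru pages frame_size) := by unfold Pre_mru; infer_instance
def pvWitness_mru : List Int × Int := ([1, 2, 3, 2, 4, 1], 3)

def Spec_mru (pages : List Int) (frame_size : Int) (out : Int × List (List (Option Int))) : Prop := out = mru_alt pages frame_size
instance (pages : List Int) (frame_size : Int) (out : Int × List (List (Option Int))) : Decidable (Spec_mru pages frame_size out) := by unfold Spec_mru; infer_instance

-- ===== CLAIM (what is proved, stated in full; the proofs are below) =====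
def Claim_equal_mru : Prop := ∀ (pages : List Int) (frame_size : Int), Dom_mru pages frame_size → Pre_mru pages frame_size → Spec_mru pages frame_size (mru pages frame_size)

-- ===== LEMMAS AND PROOFS =====

-- The coupling invariant between A's recency queue q and B's (filled, last):
-- queue and prefix hold the same pages, each without repetition, and the queue's most
-- recent page sits in slot `last` of the prefix.
def MruInv (fs : Int) (q filled : List Int) (last : Int) : Prop :=
  (filled.length : Int) ≤ fs ∧
  (∀ p : Int, p ∈ q ↔ p ∈ filled) ∧
  q.Nodup ∧
  filled.Nodup ∧
  (∀ m : Int, q.getLast? = some m → ∃ k : Nat, last = (k : Int) ∧ PySem.List.index? filled m = some k)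

-- index? returns k when slot k holds v and no earlier slot does
theorem index?_first_intro {a : Type} [BEq a] [LawfulBEq a] (xs : List a) (v : a) :
    ∀ (k : Nat), xs[k]? = some v → (∀ j : Nat, j < k → xs[j]? ≠ some v) →
    PySem.List.index? xs v = some k := by
  induction xs with
  | nil => intro k hk _; simp at hk
  | cons x t ih =>
    intro k hk hfirst
    cases k with
    | zero =>
      simp at hk
      subst hk
      exact PySem.List.index?_cons_self ..
    | succ k' =>
      have hx : x ≠ v := by
        intro h; exact hfirst 0 (Nat.succ_pos _) (by simp [h])
      rw [PySem.List.index?_cons_of_ne _ hx]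
      have := ih k' (by simpa using hk) (fun j hj => by
        have := hfirst (j+1) (by omega)
        simpa using this)
      rw [this]; rfl

theorem snapB_mem (fs : Int) (xs : List Int) (p : Int) :
    (some p) ∈ snapB fs xs ↔ p ∈ xs := by
  simp [snapB, List.mem_append, List.mem_replicate]

theorem index?_mapsome_append_repl (xs : List Int) (r : Nat) (v : Int) :
    PySem.List.index? (xs.map some ++ List.replicate r (none : Option Int)) (some v)
      = PySem.List.index? xs v := by
  induction xs with
  | nil => simp
  | cons x t ih =>
    by_cases hx : x = v
    · subst hx
      rw [List.map_cons, List.cons_append, PySem.List.index?_cons_self,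
        PySem.List.index?_cons_self]
    · rw [List.map_cons, List.cons_append,
        PySem.List.index?_cons_of_ne _ (by simpa using hx),
        PySem.List.index?_cons_of_ne _ hx, ih]

theorem index?_snapB_some (fs : Int) (xs : List Int) (v : Int) :
    PySem.List.index? (snapB fs xs) (some v) = PySem.List.index? xs v :=
  index?_mapsome_append_repl ..

theorem index?_mapsome_cons_none (xs : List Int) (t : List (Option Int)) :
    PySem.List.index? (xs.map some ++ (none : Option Int) :: t) none = some xs.length := by
  induction xs with
  | nil =>
    simp only [List.map_nil, List.nil_append, List.length_nil]
    exact PySem.List.index?_cons_self ..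
  | cons x l ih =>
    rw [List.map_cons, List.cons_append,
      PySem.List.index?_cons_of_ne _ (by simp), ih]
    rfl

theorem index?_snapB_none_of_lt (fs : Int) (xs : List Int) (h : (xs.length : Int) < fs) :
    PySem.List.index? (snapB fs xs) none = some xs.length := by
  have hr : (fs - (xs.length : Int)).toNat = ((fs - (xs.length : Int)).toNat - 1) + 1 := by omega
  unfold snapB
  rw [hr, List.replicate_succ]
  exact index?_mapsome_cons_none ..

theorem index?_snapB_none_full (fs : Int) (xs : List Int) (h : fs ≤ (xs.length : Int)) :
    PySem.List.index? (snapB fs xs) none = none := by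
  have hr : (fs - (xs.length : Int)).toNat = 0 := by omega
  unfold snapB
  rw [hr]
  exact (PySem.List.index?_eq_none_iff _ _).2 (by simp)

theorem snapB_set_fill (fs : Int) (xs : List Int) (page : Int) (h : (xs.length : Int) < fs) :
    (snapB fs xs).set xs.length (some page) = snapB fs (xs ++ [page]) := by
  have hr : (fs - (xs.length : Int)).toNat = ((fs - ((xs ++ [page]).length : Int)).toNat) + 1 := by
    simp; omega
  unfold snapB
  rw [hr, List.replicate_succ,
    List.set_append_right _ _ (by simp)]
  simp

theorem snapB_set_inner (fs : Int) (xs : List Int) (k : Nat) (page : Int) (hk : k < xs.length) :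
    (snapB fs xs).set k (some page) = snapB fs (xs.set k page) := by
  unfold snapB
  rw [List.set_append_left _ _ (by simpa), ← List.map_set]
  simp

theorem mem_set_iff_of_nodup (xs : List Int) (h : xs.Nodup) (k : Nat) (hk : k < xs.length)
    (v p : Int) : p ∈ xs.set k v ↔ p = v ∨ (p ∈ xs ∧ p ≠ xs[k]) := by
  constructor
  · intro hp
    obtain ⟨i, hi, he⟩ := List.getElem_of_mem hp
    rw [List.getElem_set] at he
    rw [List.length_set] at hi
    by_cases hik : k = i
    · rw [if_pos hik] at he
      exact Or.inl he.symm
    · rw [if_neg hik] at he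
      refine Or.inr ⟨he ▸ List.getElem_mem hi, ?_⟩
      intro hc
      exact hik ((List.Nodup.getElem_inj_iff h).1 (by rw [he, ← hc]))
  · rintro (rfl | ⟨hpx, hpne⟩)
    · exact (List.mem_iff_getElem? ..).2 ⟨k, List.getElem?_set_self hk⟩
    · obtain ⟨i, hi, he⟩ := List.getElem_of_mem hpx
      have hik : ¬ (k = i) := by
        intro hc; subst hc; exact hpne (by rw [← he])
      exact (List.mem_iff_getElem? ..).2
        ⟨i, by rw [List.getElem?_set_ne hik, List.getElem?_eq_getElem hi, he]⟩

theorem nodup_set_of_not_mem (xs : List Int) (h : xs.Nodup) (k : Nat) (hk : k < xs.length)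
    (page : Int) (hp : page ∉ xs) : (xs.set k page).Nodup := by
  rw [List.set_eq_take_cons_drop page hk]
  have hx : xs = xs.take k ++ xs[k] :: xs.drop (k + 1) := by
    rw [List.getElem_cons_drop, List.take_append_drop]
  rw [hx, List.nodup_append] at h
  obtain ⟨h1, h2, h3⟩ := h
  rw [List.nodup_append]
  refine ⟨h1, ?_, ?_⟩
  · rw [List.nodup_cons] at h2 ⊢
    refine ⟨?_, h2.2⟩
    intro hc
    exact hp (hx ▸ List.mem_append.2 (Or.inr (List.mem_cons_of_mem _ hc)))
  · intro a ha b hb he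
    rcases List.mem_cons.1 hb with rfl | hb'
    · subst he
      exact hp (hx ▸ List.mem_append.2 (Or.inl ha))
    · exact h3 a ha b (List.mem_cons_of_mem _ hb') he

theorem mem_dropLast_iff_of_nodup (q : List Int) (h : q.Nodup) (hne : q ≠ []) (p : Int) :
    p ∈ q.dropLast ↔ p ∈ q ∧ p ≠ q.getLast hne := by
  have hdec : q.dropLast ++ [q.getLast hne] = q := List.dropLast_concat_getLast hne
  have hnot : q.getLast hne ∉ q.dropLast := by
    have h0 := h
    rw [← hdec, List.nodup_append] at h0
    intro hc
    exact h0.2.2 _ hc _ (by simp) rfl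
  constructor
  · intro hpd
    refine ⟨by rw [← hdec]; exact List.mem_append.2 (Or.inl hpd), ?_⟩
    intro hc; subst hc; exact hnot hpd
  · rintro ⟨hpq, hpne⟩
    rw [← hdec] at hpq
    rcases List.mem_append.1 hpq with h1 | h1
    · exact h1
    · simp at h1; exact absurd h1 hpne

theorem go_match (fs : Int) (hfs : 1 ≤ fs) :
    ∀ (pages q filled : List Int) (last c : Int) (h : List (List (Option Int))),
      MruInv fs q filled last →
      ((pages.foldl mruStep (snapB fs filled, q, c, h)).2.2.1,
       (pages.foldl mruStep (snapB fs filled, q, c, h)).2.2.2)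
        = (c + (mruAltGo fs filled last pages).1, h ++ (mruAltGo fs filled last pages).2) := by
  intro pages
  induction pages with
  | nil => intro q filled last c h _; simp [mruAltGo]
  | cons page rest ih =>
    intro q filled last c h hInv
    obtain ⟨hle, hmem, hqnd, hfnd, hlast⟩ := hInv
    by_cases hp : page ∈ filled
    · -- HIT
      have hpf : (some page) ∈ snapB fs filled := (snapB_mem ..).2 hp
      have hpq : page ∈ q := (hmem page).2 hp
      obtain ⟨k, hk⟩ : ∃ k, PySem.List.index? filled page = some k :=
        Option.isSome_iff_exists.1 ((PySem.List.index?_isSome_iff ..).2 hp)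
      have hinv' : MruInv fs (q.erase page ++ [page]) filled ((k : Nat) : Int) := by
        refine ⟨hle, ?_, ?_, hfnd, ?_⟩
        · intro p
          rw [← hmem p]
          constructor
          · intro h1
            rcases List.mem_append.1 h1 with h2 | h2
            · exact List.mem_of_mem_erase h2
            · simp at h2; subst h2; exact hpq
          · intro h1
            by_cases hpp : p = page
            · exact List.mem_append.2 (Or.inr (by simp [hpp]))
            · exact List.mem_append.2 (Or.inl ((List.mem_erase_of_ne hpp).2 h1))
        · rw [List.nodup_append]
          refine ⟨hqnd.erase page, List.nodup_singleton _, ?_⟩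
          intro a ha b hb he
          have hbp : b = page := by simpa using hb
          rw [he, hbp] at ha
          exact hqnd.not_mem_erase ha
        · intro m hm
          rw [List.getLast?_concat] at hm
          injection hm with hm; subst hm
          exact ⟨k, rfl, hk⟩
      have := ih (q.erase page ++ [page]) filled ((k : Nat) : Int) c (h ++ [snapB fs filled]) hinv'
      simp only [List.foldl_cons, mruStep, if_pos hpf,
        PySem.List.remove?_eq_some_erase q page hpq, Option.getD_some, mruAltGo,
        if_pos hp, hk] at this ⊢
      rw [this]
      simp
    · -- MISS
      have hpf : (some page) ∉ snapB fs filled := fun hc => hp ((snapB_mem ..).1 hc)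
      have hpq : page ∉ q := fun hc => hp ((hmem page).1 hc)
      by_cases hlt : (filled.length : Int) < fs
      · -- a free slot exists
        have hidx : PySem.List.index? (snapB fs filled) none = some filled.length :=
          index?_snapB_none_of_lt fs filled hlt
        have hset : (snapB fs filled).set filled.length (some page) = snapB fs (filled ++ [page]) :=
          snapB_set_fill fs filled page hlt
        have hinv' : MruInv fs (q ++ [page]) (filled ++ [page]) ((filled.length : Int) + 1 - 1) := by
          refine ⟨by simp; omega, ?_, ?_, ?_, ?_⟩
          · intro p
            rw [List.mem_append, List.mem_append, hmem p]
          · rw [List.nodup_append]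
            exact ⟨hqnd, List.nodup_singleton _, fun a ha b hb he => hpq (by
              have hbp : b = page := by simpa using hb
              rw [he, hbp] at ha; exact ha)⟩
          · rw [List.nodup_append]
            exact ⟨hfnd, List.nodup_singleton _, fun a ha b hb he => hp (by
              have hbp : b = page := by simpa using hb
              rw [he, hbp] at ha; exact ha)⟩
          · intro m hm
            rw [List.getLast?_concat] at hm
            injection hm with hm; subst hm
            exact ⟨filled.length, by omega, PySem.List.index?_append_singleton_self _ _ hp⟩
        have := ih (q ++ [page]) (filled ++ [page]) ((filled.length : Int) + 1 - 1) (c + 1)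
          (h ++ [snapB fs (filled ++ [page])]) hinv'
        have harg : (((filled ++ [page]).length : Nat) : Int) - 1 = (filled.length : Int) + 1 - 1 := by
          simp
        simp only [List.foldl_cons, mruStep, if_neg hpf, hidx, hset, mruAltGo,
          if_neg hp, if_pos hlt, harg] at this ⊢
        rw [this]
        simp only [Prod.mk.injEq]
        exact ⟨by omega, by simp⟩
      · -- frame full: evict the MRU slot
        have hfull : fs ≤ (filled.length : Int) := by omega
        have hidx : PySem.List.index? (snapB fs filled) none = none :=
          index?_snapB_none_full fs filled hfull
        have hfne : filled ≠ [] := by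
          intro hc; rw [hc] at hfull; simp at hfull; omega
        have hqne : q ≠ [] := by
          obtain ⟨p0, hp0⟩ := List.exists_mem_of_ne_nil filled hfne
          exact List.ne_nil_of_mem ((hmem p0).2 hp0)
        have hm : q.getLast? = some (q.getLast hqne) := List.getLast?_eq_some_getLast ..
        obtain ⟨k, hlk, hik⟩ := hlast _ hm
        obtain ⟨hkf, hfk, _⟩ := PySem.List.getElem_of_index?_eq_some hik
        have hik' : PySem.List.index? (snapB fs filled) (some (q.getLast hqne)) = some k := by
          rw [index?_snapB_some, hik]
        have hsetD : PySem.List.pySetD filled last page = filled.set k page := by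
          rw [hlk]; simp
        have hset : (snapB fs filled).set k (some page) = snapB fs (filled.set k page) :=
          snapB_set_inner fs filled k page hkf
        have hmemset : ∀ p : Int, p ∈ filled.set k page ↔ p = page ∨ (p ∈ filled ∧ p ≠ q.getLast hqne) := by
          intro p
          rw [mem_set_iff_of_nodup filled hfnd k hkf, hfk]
        have hinv' : MruInv fs (q.dropLast ++ [page]) (filled.set k page) ((k : Nat) : Int) := by
          refine ⟨by simpa using hle, ?_, ?_, ?_, ?_⟩
          · intro p
            rw [List.mem_append, hmemset p, mem_dropLast_iff_of_nodup q hqnd hqne p, hmem p]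
            simp
            tauto
          · rw [List.nodup_append]
            refine ⟨hqnd.sublist (List.dropLast_sublist q), List.nodup_singleton _, ?_⟩
            intro a ha b hb he
            have hbp : b = page := by simpa using hb
            rw [he, hbp] at ha
            exact hpq ((mem_dropLast_iff_of_nodup q hqnd hqne page).1 ha).1
          · exact nodup_set_of_not_mem filled hfnd k hkf page hp
          · intro m' hm'
            rw [List.getLast?_concat] at hm'
            injection hm' with hm'; subst hm'
            refine ⟨k, rfl, ?_⟩
            apply index?_first_intro
            · exact List.getElem?_set_self hkf
            · intro j hj hcon
              rw [List.getElem?_set_ne (by omega)] at hcon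
              exact hp ((List.mem_iff_getElem? ..).2 ⟨j, hcon⟩)
        have := ih (q.dropLast ++ [page]) (filled.set k page) ((k : Nat) : Int) (c + 1)
          (h ++ [snapB fs (filled.set k page)]) hinv'
        simp only [List.foldl_cons, mruStep, if_neg hpf, hidx, hm, hik', Option.getD_some,
          hset, mruAltGo, if_neg hp, if_neg hlt, hsetD] at this ⊢
        rw [← hlk] at this
        rw [this]
        simp only [Prod.mk.injEq]
        exact ⟨by omega, by simp⟩

-- ===== VERDICT (by name: the statement is the Claim_ definition above) =====
theorem mru_spec : Claim_equal_mru := by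
  intro pages frame_size _ hpre
  unfold Spec_mru mru mru_alt
  rcases hpre with h | h
  · subst h; rfl
  · have hsnap : snapB frame_size [] = List.replicate frame_size.toNat none := by
      simp [snapB]
    have hinv : MruInv frame_size [] [] (-1) := by
      refine ⟨by simp; omega, by simp, List.nodup_nil, List.nodup_nil, ?_⟩
      intro m hm; simp at hm
    have := go_match frame_size h pages [] [] (-1) 0 [] hinv
    rw [hsnap] at this
    simpa using this
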